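-- pv_equiv track=rewrite | github.com/Small-tailqwq/AhabAssistantLimbusCompany | tasks/tools/asset_library/model.py | _category_for_path
-- ===== SOURCE A (Python) =====
-- _IMAGE_EXTENSIONS = (".png", ".webp", ".jpg", ".jpeg", ".bmp")
--
-- CATEGORY_MAP = {
--     "home": "home",
--     "enkephalin": "enkephalin",
--     "battle": "battle",
--     "mail": "mail",
--     "scenes": "scenes",
--     "base": "base",
--     "mirror/road_in_mir": "mirror_road",
--     "mirror/road_to_mir": "mirror_road",
--     "mirror/shop": "mirror_shop",
--     "mirror/event": "mirror_event",
--     "mirror/claim_reward": "mirror_reward",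
--     "mirror/get_reward_card": "mirror_reward",
--     "mirror/theme_pack": "mirror_theme_pack",
--     "teams": "teams",
--     "pass": "pass",
--     "luxcavation": "luxcavation",
--     "event": "event",
-- }
--
-- def _category_for_path(rel_path: str) -> str:
--     """Map a file path (relative to assets/images/) to a category key."""
--     normalized = rel_path.replace("\\", "/")
--     parts = normalized.split("/")
--     if len(parts) >= 3:
--         inner = "/".join(parts[2:])
--     else:
--         inner = normalized
--
--     if inner.startswith("mirror/") and inner.count("/") == 1 and inner.lower().endswith(_IMAGE_EXTENSIONS):
--         return "mirror_ui"
--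
--     for prefix, category in CATEGORY_MAP.items():
--         if inner.startswith(prefix + "/") or inner == prefix:
--             return category
--     return "uncategorized"
-- ===== SOURCE B (Python) =====
-- _IMAGE_EXTENSIONS = (".png", ".webp", ".jpg", ".jpeg", ".bmp")
--
-- CATEGORY_MAP = {
--     "home": "home",
--     "enkephalin": "enkephalin",
--     "battle": "battle",
--     "mail": "mail",
--     "scenes": "scenes",
--     "base": "base",
--     "mirror/road_in_mir": "mirror_road",
--     "mirror/road_to_mir": "mirror_road",
--     "mirror/shop": "mirror_shop",
--     "mirror/event": "mirror_event",
--     "mirror/claim_reward": "mirror_reward",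
--     "mirror/get_reward_card": "mirror_reward",
--     "mirror/theme_pack": "mirror_theme_pack",
--     "teams": "teams",
--     "pass": "pass",
--     "luxcavation": "luxcavation",
--     "event": "event",
-- }
--
-- def _category_for_path(rel_path: str) -> str:
--     """Map a file path (relative to assets/images/) to a category key."""
--     # Work on path SEGMENTS throughout: split once on both separators,
--     # then classify by direct dict lookups instead of scanning CATEGORY_MAP.
--     segs = []
--     cur = []
--     for ch in rel_path:
--         if ch == "/" or ch == "\\":
--             segs.append("".join(cur))
--             cur = []
--         else:
--             cur.append(ch)
--     segs.append("".join(cur))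
--
--     inner = segs[2:] if len(segs) >= 3 else segs
--
--     if len(inner) == 2 and inner[0] == "mirror" and inner[1].lower().endswith(_IMAGE_EXTENSIONS):
--         return "mirror_ui"
--
--     if len(inner) >= 2:
--         cat = CATEGORY_MAP.get(inner[0] + "/" + inner[1])
--         if cat is not None:
--             return cat
--     return CATEGORY_MAP.get(inner[0], "uncategorized")
-- ===== Notes on version B (the rewrite author's own statement) =====
-- stated objective: alternative
-- what changed: B never builds the normalized string or the joined inner path: it splits rel_path once, character by character, on both separators into a segment list, selects the inner segments, decides the mirror_ui guard on the two segments directly, and classifies by two direct dict lookups (two-segment key, then one-segment key) instead of A's replace/split/join string pipeline followed by an ordered startswith scan over all 17 CATEGORY_MAP entries.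
import Mathlib
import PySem

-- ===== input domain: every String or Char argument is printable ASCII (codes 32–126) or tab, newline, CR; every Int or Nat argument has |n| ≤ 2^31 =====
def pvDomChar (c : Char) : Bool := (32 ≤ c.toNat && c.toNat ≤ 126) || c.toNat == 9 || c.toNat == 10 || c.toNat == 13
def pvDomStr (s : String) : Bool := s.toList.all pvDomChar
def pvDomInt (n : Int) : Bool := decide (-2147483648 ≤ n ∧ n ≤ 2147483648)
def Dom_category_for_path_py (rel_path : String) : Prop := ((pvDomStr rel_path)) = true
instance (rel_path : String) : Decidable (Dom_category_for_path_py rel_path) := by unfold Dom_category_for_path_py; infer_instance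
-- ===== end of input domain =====

-- B replaces A's replace/split/join string pipeline + ordered CATEGORY_MAP scan by one segment split and two direct dict lookups (alternative; not claimed faster).

-- ===== PORT A =====
def pvImageExts : List (List Char) :=
  [".png".toList, ".webp".toList, ".jpg".toList, ".jpeg".toList, ".bmp".toList]

def pvCategoryItems : List (List Char × String) :=
  [ ("home".toList, "home"),
    ("enkephalin".toList, "enkephalin"),
    ("battle".toList, "battle"),
    ("mail".toList, "mail"),
    ("scenes".toList, "scenes"),
    ("base".toList, "base"),
    ("mirror/road_in_mir".toList, "mirror_road"),
    ("mirror/road_to_mir".toList, "mirror_road"),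
    ("mirror/shop".toList, "mirror_shop"),
    ("mirror/event".toList, "mirror_event"),
    ("mirror/claim_reward".toList, "mirror_reward"),
    ("mirror/get_reward_card".toList, "mirror_reward"),
    ("mirror/theme_pack".toList, "mirror_theme_pack"),
    ("teams".toList, "teams"),
    ("pass".toList, "pass"),
    ("luxcavation".toList, "luxcavation"),
    ("event".toList, "event") ]

-- normalized / parts / inner of A
def pvInner (rel_path : String) : List Char :=
  let normalized := PySem.Chars.replace rel_path.toList ['\\'] ['/']
  let parts := PySem.Chars.splitOn normalized ['/']
  if 3 ≤ parts.length then PySem.Chars.join ['/'] (parts.drop 2) else normalized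

-- A's mirror_ui guard: inner.startswith("mirror/") and inner.count("/") == 1 and inner.lower().endswith(exts)
def pvGuard (inner : List Char) : Bool :=
  PySem.Chars.startswith inner "mirror/".toList
    && (PySem.Chars.count inner ['/'] == 1)
    && pvImageExts.any (fun e => PySem.Chars.endswith (PySem.Chars.lower inner) e)

-- the for-loop over CATEGORY_MAP.items(): first entry with inner.startswith(prefix+"/") or inner == prefix
def pvScan : List (List Char × String) → List Char → String
  | [], _ => "uncategorized"
  | (p, c) :: rest, inner =>
      if PySem.Chars.startswith inner (p ++ ['/']) || inner == p then c else pvScan rest inner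

def category_for_path_py (rel_path : String) : String :=
  let inner := pvInner rel_path
  if pvGuard inner then "mirror_ui"
  else pvScan pvCategoryItems inner

-- ===== PORT B =====
def pvCatPairsB : List (String × String) :=
  [ ("home", "home"), ("enkephalin", "enkephalin"), ("battle", "battle"),
    ("mail", "mail"), ("scenes", "scenes"), ("base", "base"),
    ("mirror/road_in_mir", "mirror_road"), ("mirror/road_to_mir", "mirror_road"),
    ("mirror/shop", "mirror_shop"), ("mirror/event", "mirror_event"),
    ("mirror/claim_reward", "mirror_reward"), ("mirror/get_reward_card", "mirror_reward"),
    ("mirror/theme_pack", "mirror_theme_pack"), ("teams", "teams"), ("pass", "pass"),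
    ("luxcavation", "luxcavation"), ("event", "event") ]

def pvCatMapB : PySem.Dict (List Char) String :=
  PySem.Dict.mk (pvCatPairsB.map (fun kv => (kv.1.toList, kv.2)))

def pvExtsB : List String := [".png", ".webp", ".jpg", ".jpeg", ".bmp"]

-- B's character loop: append cur on a separator, else extend cur
def pvSplitStep (st : List (List Char) × List Char) (ch : Char) : List (List Char) × List Char :=
  if ch = '/' ∨ ch = '\\' then (st.1 ++ [st.2], []) else (st.1, st.2 ++ [ch])

def category_for_path_py_alt (rel_path : String) : String :=
  let st := rel_path.toList.foldl pvSplitStep ([], [])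
  let segs := st.1 ++ [st.2]
  let inner := if 3 ≤ segs.length then segs.drop 2 else segs
  -- `inner` is never empty and Python's inner[1] accesses are guarded by length tests, so `.getD []` is unreachable
  let s0 := (PySem.List.pyGet? inner 0).getD []
  let s1 := (PySem.List.pyGet? inner 1).getD []
  if inner.length == 2 && (s0 == "mirror".toList)
      && pvExtsB.any (fun e => PySem.Chars.endswith (PySem.Chars.lower s1) e.toList)
  then "mirror_ui"
  else if 2 ≤ inner.length then
    match pvCatMapB.get? (s0 ++ "/".toList ++ s1) with
    | some c => c
    | none => pvCatMapB.getD s0 "uncategorized"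
  else pvCatMapB.getD s0 "uncategorized"

-- ===== PRECONDITION & SPEC =====
def Spec_category_for_path_py (rel_path : String) (out : String) : Prop := out = category_for_path_py_alt rel_path
instance (rel_path : String) (out : String) : Decidable (Spec_category_for_path_py rel_path out) := by unfold Spec_category_for_path_py; infer_instance

-- ===== CLAIM =====
def Claim_equal_category_for_path_py : Prop := ∀ (rel_path : String), Dom_category_for_path_py rel_path → Spec_category_for_path_py rel_path (category_for_path_py rel_path)

-- ===== LEMMAS AND PROOFS =====

-- a clean structural model of splitting on '/'
def pvPrepend (x : List Char) : List (List Char) → List (List Char)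
  | [] => []
  | y :: ys => (x ++ y) :: ys

def pvSplitSlash : List Char → List (List Char)
  | [] => [[]]
  | c :: t => if c = '/' then [] :: pvSplitSlash t else pvPrepend [c] (pvSplitSlash t)

def pvRepl (c : Char) : Char := if c = '\\' then '/' else c

lemma pvPrepend_ne_nil {x : List Char} {ys : List (List Char)} (h : ys ≠ []) :
    pvPrepend x ys ≠ [] := by
  cases ys with
  | nil => exact absurd rfl h
  | cons y ys => simp [pvPrepend]

lemma pvSplitSlash_ne_nil (s : List Char) : pvSplitSlash s ≠ [] := by
  induction s with
  | nil => simp [pvSplitSlash]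
  | cons c t ih =>
    by_cases h : c = '/'
    · simp [pvSplitSlash, h]
    · simpa [pvSplitSlash, h] using pvPrepend_ne_nil ih

lemma pvPrepend_pvPrepend (x y : List Char) (ys : List (List Char)) :
    pvPrepend x (pvPrepend y ys) = pvPrepend (x ++ y) ys := by
  cases ys <;> simp [pvPrepend]

lemma pvSplitSlash_go (fuel : Nat) :
    ∀ (l cur : List Char) (acc : List (List Char)), l.length < fuel →
      PySem.Chars.splitOn.go ['/'] fuel l cur acc =
        acc.reverse ++ pvPrepend cur.reverse (pvSplitSlash l) := by
  induction fuel with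
  | zero => intro l cur acc h; omega
  | succ n ih =>
    intro l cur acc h
    cases l with
    | nil =>
      simp [PySem.Chars.splitOn.go, pvSplitSlash, pvPrepend]
    | cons c rest =>
      by_cases hc : c = '/'
      · subst hc
        rw [PySem.Chars.splitOn.go]
        have hpre : List.isPrefixOf ['/'] ('/' :: rest) = true := by simp [List.isPrefixOf]
        rw [if_pos hpre]
        have hlen : rest.length < n := by simp at h; omega
        simp only [List.length_singleton, List.drop_succ_cons, List.drop_zero]
        rw [ih _ _ _ hlen]
        cases hsp : pvSplitSlash rest with
        | nil => exact absurd hsp (pvSplitSlash_ne_nil rest)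
        | cons y ys =>
          simp [pvSplitSlash, pvPrepend, hsp]
      · rw [PySem.Chars.splitOn.go]
        have hpre : List.isPrefixOf ['/'] (c :: rest) = false := by
          simp [List.isPrefixOf]
          intro h'; exact absurd h'.symm hc
        rw [if_neg (by simp [hpre])]
        have hlen : rest.length < n := by simp at h; omega
        rw [ih _ _ _ hlen]
        simp [pvSplitSlash, hc, pvPrepend_pvPrepend]

lemma splitOn_eq (s : List Char) : PySem.Chars.splitOn s ['/'] = pvSplitSlash s := by
  unfold PySem.Chars.splitOn
  rw [pvSplitSlash_go (s.length + 1) s [] [] (Nat.lt_succ_self _)]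
  cases hsp : pvSplitSlash s with
  | nil => exact absurd hsp (pvSplitSlash_ne_nil s)
  | cons y ys => simp [pvPrepend]

-- replace(s, "\\", "/") is the character map pvRepl
lemma replace_go_eq (fuel : Nat) :
    ∀ (l acc : List Char), l.length ≤ fuel →
      PySem.Chars.replace.go ['\\'] ['/'] fuel l acc = acc.reverse ++ l.map pvRepl := by
  induction fuel with
  | zero =>
    intro l acc h
    have : l = [] := List.length_eq_zero_iff.mp (Nat.le_zero.mp h)
    subst this; simp [PySem.Chars.replace.go]
  | succ n ih =>
    intro l acc h
    cases l with
    | nil => simp [PySem.Chars.replace.go]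
    | cons c t =>
      by_cases hc : c = '\\'
      · subst hc
        rw [PySem.Chars.replace.go]
        have hpre : List.isPrefixOf ['\\'] ('\\' :: t) = true := by simp [List.isPrefixOf]
        rw [if_pos hpre]
        have hlen : t.length ≤ n := by simp at h; omega
        simp only [List.length_singleton, List.drop_succ_cons, List.drop_zero, List.reverse_singleton]
        rw [ih _ _ hlen]
        simp [pvRepl]
      · rw [PySem.Chars.replace.go]
        have hpre : List.isPrefixOf ['\\'] (c :: t) = false := by
          simp [List.isPrefixOf]
          intro h'; exact absurd h'.symm hc
        rw [if_neg (by simp [hpre])]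
        have hlen : t.length ≤ n := by simp at h; omega
        rw [ih _ _ hlen]
        simp [pvRepl, hc]

lemma replace_eq (s : List Char) :
    PySem.Chars.replace s ['\\'] ['/'] = s.map pvRepl := by
  unfold PySem.Chars.replace
  rw [if_neg (by simp)]
  simpa using replace_go_eq s.length s [] (Nat.le_refl _)

-- B's foldl split computes pvSplitSlash of the pvRepl-mapped characters
lemma foldl_split (l : List Char) :
    ∀ (acc : List (List Char)) (cur : List Char),
      (l.foldl pvSplitStep (acc, cur)).1 ++ [(l.foldl pvSplitStep (acc, cur)).2] =
        acc ++ pvPrepend cur (pvSplitSlash (l.map pvRepl)) := by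
  induction l with
  | nil => intro acc cur; simp [pvSplitSlash, pvPrepend]
  | cons c t ih =>
    intro acc cur
    by_cases hc : c = '/' ∨ c = '\\'
    · have hr : pvRepl c = '/' := by rcases hc with rfl | rfl <;> simp [pvRepl]
      simp only [List.foldl_cons, pvSplitStep, if_pos hc]
      rw [ih]
      simp only [List.map_cons, hr, pvSplitSlash]
      cases hsp : pvSplitSlash (t.map pvRepl) with
      | nil => exact absurd hsp (pvSplitSlash_ne_nil _)
      | cons y ys => simp [pvPrepend]
    · have hr : pvRepl c = c := by
        simp only [pvRepl, if_neg (fun h => hc (Or.inr h))]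
      have hcs : ¬ c = '/' := fun h => hc (Or.inl h)
      simp only [List.foldl_cons, pvSplitStep, if_neg hc]
      rw [ih]
      simp [pvSplitSlash, hr, hcs, pvPrepend_pvPrepend]

lemma segs_eq (s : List Char) :
    ((s.foldl pvSplitStep (([] : List (List Char)), ([] : List Char))).1 ++
      [(s.foldl pvSplitStep (([] : List (List Char)), ([] : List Char))).2]) =
      pvSplitSlash (s.map pvRepl) := by
  rw [foldl_split]
  cases hsp : pvSplitSlash (s.map pvRepl) with
  | nil => exact absurd hsp (pvSplitSlash_ne_nil _)
  | cons y ys => simp [pvPrepend]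

-- the segments produced by pvSplitSlash are slash-free
lemma pvSplitSlash_sf (s : List Char) : ∀ x ∈ pvSplitSlash s, '/' ∉ x := by
  induction s with
  | nil => intro x hx; simp [pvSplitSlash] at hx; simp [hx]
  | cons c t ih =>
    intro x hx
    by_cases hc : c = '/'
    · simp only [pvSplitSlash, if_pos hc, List.mem_cons] at hx
      rcases hx with rfl | hx
      · simp
      · exact ih x hx
    · simp only [pvSplitSlash, if_neg hc] at hx
      cases hsp : pvSplitSlash t with
      | nil => exact absurd hsp (pvSplitSlash_ne_nil _)
      | cons y ys =>
        rw [hsp] at hx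
        simp only [pvPrepend, List.mem_cons] at hx
        rcases hx with rfl | hx
        · intro hm
          rcases List.mem_cons.mp (by simpa using hm) with rfl | hm'
          · exact hc rfl
          · exact ih y (by simp [hsp]) hm'
        · exact ih x (by simp [hsp, hx])

-- join is a left inverse of pvSplitSlash
lemma join_pvSplitSlash (s : List Char) :
    PySem.Chars.join ['/'] (pvSplitSlash s) = s := by
  induction s with
  | nil => simp [pvSplitSlash, PySem.Chars.join_singleton]
  | cons c t ih =>
    by_cases hc : c = '/'
    · subst hc
      rw [show pvSplitSlash ('/' :: t) = [] :: pvSplitSlash t from by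
        simp [pvSplitSlash]]
      cases hsp : pvSplitSlash t with
      | nil => exact absurd hsp (pvSplitSlash_ne_nil _)
      | cons y ys =>
        rw [hsp] at ih
        rw [PySem.Chars.join_cons_cons, ih]
        simp
    · simp only [pvSplitSlash, if_neg hc]
      cases hsp : pvSplitSlash t with
      | nil => exact absurd hsp (pvSplitSlash_ne_nil _)
      | cons y ys =>
        cases ys with
        | nil =>
          simp only [pvPrepend, PySem.Chars.join_singleton]
          rw [hsp] at ih
          simp only [PySem.Chars.join_singleton] at ih
          simp [ih]
        | cons z zs =>
          simp only [pvPrepend, PySem.Chars.join_cons_cons]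
          rw [hsp] at ih
          rw [PySem.Chars.join_cons_cons] at ih
          simp [ih]

-- count of the single character '/'
lemma count_go_eq (fuel : Nat) :
    ∀ (l : List Char) (acc : Nat), l.length ≤ fuel →
      PySem.Chars.count.go ['/'] fuel l acc = acc + l.count '/' := by
  induction fuel with
  | zero =>
    intro l acc h
    have : l = [] := List.length_eq_zero_iff.mp (Nat.le_zero.mp h)
    subst this; simp [PySem.Chars.count.go]
  | succ n ih =>
    intro l acc h
    cases l with
    | nil => simp [PySem.Chars.count.go]
    | cons c t =>
      have hlen : t.length ≤ n := by simp at h; omega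
      by_cases hc : c = '/'
      · subst hc
        rw [PySem.Chars.count.go]
        have hpre : List.isPrefixOf ['/'] ('/' :: t) = true := by simp [List.isPrefixOf]
        rw [if_pos hpre]
        simp only [List.length_singleton, List.drop_succ_cons, List.drop_zero]
        rw [ih _ _ hlen]
        simp
        omega
      · rw [PySem.Chars.count.go]
        have hpre : List.isPrefixOf ['/'] (c :: t) = false := by
          simp [List.isPrefixOf]
          intro h'; exact absurd h'.symm hc
        rw [if_neg (by simp [hpre])]
        rw [ih _ _ hlen]
        simp [hc]

lemma count_slash (s : List Char) : PySem.Chars.count s ['/'] = s.count '/' := by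
  unfold PySem.Chars.count
  rw [if_neg (by simp)]
  simpa using count_go_eq s.length s 0 (Nat.le_refl _)

lemma count_sf {a : List Char} (ha : '/' ∉ a) : a.count '/' = 0 :=
  List.count_eq_zero.mpr ha

-- an extension without '/' ends a path iff it ends its last segment
lemma pref_cross {e : List Char} (a t : List Char) (he : '/' ∉ e) :
    (e <+: a ++ '/' :: t) ↔ e <+: a := by
  induction e generalizing a with
  | nil => simp
  | cons c e' ih =>
    have hc : c ≠ '/' := fun h => he (h ▸ List.mem_cons_self ..)
    have he' : '/' ∉ e' := fun h => he (List.mem_cons_of_mem _ h)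
    cases a with
    | nil =>
      simp only [List.nil_append, List.cons_prefix_cons]
      constructor
      · rintro ⟨rfl, -⟩; exact absurd rfl hc
      · intro h; exact absurd h (by simp)
    | cons d a' =>
      simp only [List.cons_append, List.cons_prefix_cons, ih a' he']

lemma endswith_cross {e : List Char} (x u : List Char) (he : '/' ∉ e) :
    PySem.Chars.endswith (x ++ '/' :: u) e = PySem.Chars.endswith u e := by
  rw [Bool.eq_iff_iff]
  simp only [PySem.Chars.endswith, List.isSuffixOf_iff_suffix]
  rw [← List.reverse_prefix, ← List.reverse_prefix (l₂ := u)]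
  have : (x ++ '/' :: u).reverse = u.reverse ++ '/' :: x.reverse := by
    simp
  rw [this]
  exact pref_cross _ _ (by simpa using he)

lemma lower_split (a t : List Char) :
    PySem.Chars.lower (a ++ '/' :: t) =
      PySem.Chars.lower a ++ '/' :: PySem.Chars.lower t := by
  simp only [PySem.Chars.lower, List.map_append, List.map_cons]
  rfl

-- the central prefix/equality facts about slash-free first segments
lemma pref_seg {u a : List Char} (w t : List Char) (hu : '/' ∉ u) (ha : '/' ∉ a) :
    (u ++ '/' :: w <+: a ++ '/' :: t) ↔ (u = a ∧ w <+: t) := by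
  induction u generalizing a with
  | nil =>
    cases a with
    | nil => simp
    | cons c a' =>
      simp only [List.nil_append, List.cons_append, List.cons_prefix_cons]
      have hc : c ≠ '/' := fun h => ha (h ▸ List.mem_cons_self ..)
      constructor
      · rintro ⟨h1, -⟩; exact absurd h1.symm hc
      · rintro ⟨h, -⟩; exact absurd h (by simp)
  | cons d u' ih =>
    have hd : d ≠ '/' := fun h => hu (h ▸ List.mem_cons_self ..)
    have hu' : '/' ∉ u' := fun h => hu (List.mem_cons_of_mem _ h)
    cases a with
    | nil =>
      simp only [List.cons_append, List.nil_append, List.cons_prefix_cons]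
      constructor
      · rintro ⟨h1, -⟩; exact absurd h1 hd
      · rintro ⟨h, -⟩; exact absurd h (by simp)
    | cons c a' =>
      have ha' : '/' ∉ a' := fun h => ha (List.mem_cons_of_mem _ h)
      simp only [List.cons_append, List.cons_prefix_cons, ih hu' ha', List.cons.injEq]
      tauto

lemma eq_seg {u a : List Char} (w t : List Char) (hu : '/' ∉ u) (ha : '/' ∉ a) :
    (u ++ '/' :: w = a ++ '/' :: t) ↔ (u = a ∧ w = t) := by
  induction u generalizing a with
  | nil =>
    cases a with
    | nil => simp
    | cons c a' =>
      have hc : c ≠ '/' := fun h => ha (h ▸ List.mem_cons_self ..)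
      simp only [List.nil_append, List.cons_append, List.cons.injEq]
      constructor
      · rintro ⟨h1, -⟩; exact absurd h1.symm hc
      · rintro ⟨h, -⟩; exact absurd h (by simp)
  | cons d u' ih =>
    have hd : d ≠ '/' := fun h => hu (h ▸ List.mem_cons_self ..)
    have hu' : '/' ∉ u' := fun h => hu (List.mem_cons_of_mem _ h)
    cases a with
    | nil =>
      simp only [List.cons_append, List.nil_append, List.cons.injEq]
      constructor
      · rintro ⟨h1, -⟩; exact absurd h1 hd
      · rintro ⟨h, -⟩; exact absurd h (by simp)
    | cons c a' =>
      have ha' : '/' ∉ a' := fun h => ha (List.mem_cons_of_mem _ h)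
      simp only [List.cons_append, List.cons.injEq, ih hu' ha']
      tauto

lemma slash_mem (a t : List Char) : '/' ∈ a ++ '/' :: t :=
  List.mem_append_right _ (List.mem_cons_self ..)

-- Bool-level condition rewrites, oriented like B's dict-lookup conditions (key == candidate)
lemma condS_noslash {p s : List Char} (hp : '/' ∉ p) (hs : '/' ∉ s) :
    (PySem.Chars.startswith s (p ++ ['/']) || (s == p)) = (p == s) := by
  rw [Bool.eq_iff_iff]
  simp only [Bool.or_eq_true, beq_iff_eq, PySem.Chars.startswith_iff]
  constructor
  · rintro (h | rfl)
    · exact absurd (h.subset (by simp)) hs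
    · rfl
  · rintro rfl; exact Or.inr rfl

lemma condS_slash {p a : List Char} (t : List Char) (hp : '/' ∉ p) (ha : '/' ∉ a) :
    (PySem.Chars.startswith (a ++ '/' :: t) (p ++ ['/']) || ((a ++ '/' :: t) == p)) = (p == a) := by
  rw [Bool.eq_iff_iff]
  simp only [Bool.or_eq_true, beq_iff_eq, PySem.Chars.startswith_iff]
  constructor
  · rintro (h | h)
    · exact ((pref_seg [] t hp ha).mp h).1
    · exact absurd (h ▸ slash_mem a t) hp
  · rintro rfl
    exact Or.inl ((pref_seg [] t hp ha).mpr ⟨rfl, List.nil_prefix⟩)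

lemma condM_slash1 {u v a t : List Char} (hu : '/' ∉ u) (hv : '/' ∉ v)
    (ha : '/' ∉ a) (ht : '/' ∉ t) :
    (PySem.Chars.startswith (a ++ '/' :: t) ((u ++ '/' :: v) ++ ['/']) ||
      ((a ++ '/' :: t) == (u ++ '/' :: v))) = ((u ++ '/' :: v) == (a ++ '/' :: t)) := by
  rw [Bool.eq_iff_iff]
  simp only [Bool.or_eq_true, beq_iff_eq, PySem.Chars.startswith_iff, List.append_assoc,
    List.cons_append]
  rw [pref_seg (v ++ ['/']) t hu ha, eq_seg t v ha hu, eq_seg v t hu ha]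
  constructor
  · rintro (⟨rfl, h⟩ | ⟨rfl, rfl⟩)
    · exact absurd (h.subset (by simp)) ht
    · exact ⟨rfl, rfl⟩
  · rintro ⟨rfl, rfl⟩
    exact Or.inr ⟨rfl, rfl⟩

lemma condM_slash2 {u v a b : List Char} (r : List Char) (hu : '/' ∉ u) (hv : '/' ∉ v)
    (ha : '/' ∉ a) (hb : '/' ∉ b) :
    (PySem.Chars.startswith (a ++ '/' :: (b ++ '/' :: r)) ((u ++ '/' :: v) ++ ['/']) ||
      ((a ++ '/' :: (b ++ '/' :: r)) == (u ++ '/' :: v))) = ((u ++ '/' :: v) == (a ++ '/' :: b)) := by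
  rw [Bool.eq_iff_iff]
  simp only [Bool.or_eq_true, beq_iff_eq, PySem.Chars.startswith_iff, List.append_assoc,
    List.cons_append]
  rw [pref_seg (v ++ ['/']) (b ++ '/' :: r) hu ha, eq_seg (b ++ '/' :: r) v ha hu,
    pref_seg [] r hv hb, eq_seg v b hu ha]
  constructor
  · rintro (⟨rfl, rfl, -⟩ | ⟨rfl, h⟩)
    · exact ⟨rfl, rfl⟩
    · exact absurd (h ▸ slash_mem b r) hv
  · rintro ⟨rfl, rfl⟩
    exact Or.inl ⟨rfl, rfl, List.nil_prefix⟩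

lemma condM_noslash {u v s : List Char} (hs : '/' ∉ s) :
    (PySem.Chars.startswith s ((u ++ '/' :: v) ++ ['/']) || (s == (u ++ '/' :: v))) = false := by
  rw [Bool.eq_iff_iff]
  simp only [Bool.or_eq_true, beq_iff_eq, PySem.Chars.startswith_iff, Bool.false_eq_true,
    iff_false]
  rintro (h | rfl)
  · exact absurd (h.subset (by simp)) hs
  · exact absurd (slash_mem u v) hs

lemma beqM_noslash {u v s : List Char} (hs : '/' ∉ s) : ((u ++ '/' :: v) == s) = false := by
  simp only [beq_eq_false_iff_ne, ne_eq]
  rintro rfl; exact absurd (slash_mem u v) hs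

lemma beqS_slash {p a : List Char} (t : List Char) (hp : '/' ∉ p) :
    (p == (a ++ '/' :: t)) = false := by
  simp only [beq_eq_false_iff_ne, ne_eq]
  rintro rfl; exact absurd (slash_mem a t) hp

lemma beqM_ne {u v a t : List Char} (hu : '/' ∉ u) (ha : '/' ∉ a) (hne : u ≠ a) :
    ((u ++ '/' :: v) == (a ++ '/' :: t)) = false := by
  simp only [beq_eq_false_iff_ne, ne_eq]
  intro h; exact hne ((eq_seg v t hu ha).mp h).1

-- decompositions of the two-segment literal keys
lemma pvE1 : ("mirror/road_in_mir".toList : List Char) = "mirror".toList ++ '/' :: "road_in_mir".toList := by decide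
lemma pvE2 : ("mirror/road_to_mir".toList : List Char) = "mirror".toList ++ '/' :: "road_to_mir".toList := by decide
lemma pvE3 : ("mirror/shop".toList : List Char) = "mirror".toList ++ '/' :: "shop".toList := by decide
lemma pvE4 : ("mirror/event".toList : List Char) = "mirror".toList ++ '/' :: "event".toList := by decide
lemma pvE5 : ("mirror/claim_reward".toList : List Char) = "mirror".toList ++ '/' :: "claim_reward".toList := by decide
lemma pvE6 : ("mirror/get_reward_card".toList : List Char) = "mirror".toList ++ '/' :: "get_reward_card".toList := by decide
lemma pvE7 : ("mirror/theme_pack".toList : List Char) = "mirror".toList ++ '/' :: "theme_pack".toList := by decide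

-- combined per-entry condition rewrites (goal-directed, used by `exact`)
lemma condS_slash1' {p a : List Char} (t : List Char) (hp : '/' ∉ p) (ha : '/' ∉ a) :
    (PySem.Chars.startswith (a ++ '/' :: t) (p ++ ['/']) || ((a ++ '/' :: t) == p)) =
      (p == (a ++ '/' :: t) || p == a) := by
  rw [condS_slash t hp ha, beqS_slash t hp]
  simp

lemma condS_slash2' {p a b : List Char} (r : List Char) (hp : '/' ∉ p) (ha : '/' ∉ a) :
    (PySem.Chars.startswith (a ++ '/' :: (b ++ '/' :: r)) (p ++ ['/']) ||
      ((a ++ '/' :: (b ++ '/' :: r)) == p)) = (p == (a ++ '/' :: b) || p == a) := by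
  rw [condS_slash (b ++ '/' :: r) hp ha, beqS_slash b hp]
  simp

lemma condM_slash1' {u v a t : List Char} (hu : '/' ∉ u) (hv : '/' ∉ v)
    (ha : '/' ∉ a) (ht : '/' ∉ t) :
    (PySem.Chars.startswith (a ++ '/' :: t) ((u ++ '/' :: v) ++ ['/']) ||
      ((a ++ '/' :: t) == (u ++ '/' :: v))) =
      ((u ++ '/' :: v) == (a ++ '/' :: t) || (u ++ '/' :: v) == a) := by
  rw [condM_slash1 hu hv ha ht, beqM_noslash ha]
  simp

lemma condM_slash2' {u v a b : List Char} (r : List Char) (hu : '/' ∉ u) (hv : '/' ∉ v)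
    (ha : '/' ∉ a) (hb : '/' ∉ b) :
    (PySem.Chars.startswith (a ++ '/' :: (b ++ '/' :: r)) ((u ++ '/' :: v) ++ ['/']) ||
      ((a ++ '/' :: (b ++ '/' :: r)) == (u ++ '/' :: v))) =
      ((u ++ '/' :: v) == (a ++ '/' :: b) || (u ++ '/' :: v) == a) := by
  rw [condM_slash2 r hu hv ha hb, beqM_noslash ha]
  simp

-- the B-side dict coincides with the item list the scan walks
lemma catMapB_eq : pvCatMapB = PySem.Dict.mk pvCategoryItems := rfl

-- the ordered scan equals a single dict lookup when every entry's test is (key == x)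
lemma scan_eq_get (items : List (List Char × String)) (s x : List Char)
    (h : ∀ p c, (p, c) ∈ items →
      (PySem.Chars.startswith s (p ++ ['/']) || (s == p)) = (p == x)) :
    pvScan items s = ((PySem.Dict.mk items).get? x).getD "uncategorized" := by
  induction items with
  | nil => simp [pvScan, PySem.Dict.get?]
  | cons pc rest ih =>
    obtain ⟨p, c⟩ := pc
    simp only [pvScan]
    rw [h p c (List.mem_cons_self ..), PySem.Dict.get?_mk_cons]
    cases hpx : (p == x) with
    | true => simp
    | false =>
      simp only [Bool.false_eq_true, if_false]
      exact ih (fun p' c' hm => h p' c' (List.mem_cons_of_mem _ hm))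

-- the ordered scan equals lookup of x2 then of x1 when every entry's test is (key == x2 || key == x1)
-- and at most one of x2, x1 has an entry at all
lemma scan_eq_get2 (items : List (List Char × String)) (s x2 x1 : List Char)
    (h : ∀ p c, (p, c) ∈ items →
      (PySem.Chars.startswith s (p ++ ['/']) || (s == p)) = (p == x2 || p == x1))
    (hd : (PySem.Dict.mk items).get? x2 = none ∨ (PySem.Dict.mk items).get? x1 = none) :
    pvScan items s =
      (match (PySem.Dict.mk items).get? x2 with
        | some c => c
        | none => ((PySem.Dict.mk items).get? x1).getD "uncategorized") := by
  induction items with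
  | nil => simp [pvScan, PySem.Dict.get?]
  | cons pc rest ih =>
    obtain ⟨p, c⟩ := pc
    simp only [pvScan]
    rw [h p c (List.mem_cons_self ..), PySem.Dict.get?_mk_cons, PySem.Dict.get?_mk_cons]
    rw [PySem.Dict.get?_mk_cons, PySem.Dict.get?_mk_cons] at hd
    cases h2 : (p == x2) with
    | true => simp
    | false =>
      cases h1 : (p == x1) with
      | true =>
        simp only [Bool.false_eq_true, if_false, Bool.false_or, if_pos]
        rcases hd with hd | hd
        · simp only [h2, Bool.false_eq_true, if_false] at hd
          simp [hd]
        · simp [h1] at hd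
      | false =>
        simp only [Bool.or_self, Bool.false_eq_true, if_false]
        refine ih (fun p' c' hm => h p' c' (List.mem_cons_of_mem _ hm)) ?_
        simpa [h2, h1] using hd

lemma get?_mirror_none : (PySem.Dict.mk pvCategoryItems).get? "mirror".toList = none := by decide

lemma get?_slashkey_none {a : List Char} (t : List Char) (ha : '/' ∉ a)
    (hm : a ≠ "mirror".toList) : (PySem.Dict.mk pvCategoryItems).get? (a ++ '/' :: t) = none := by
  have hmem : ∀ x ∈ pvCategoryItems, (x.1 == a ++ '/' :: t) = false := by
    intro x hx
    simp only [pvCategoryItems, List.mem_cons, List.not_mem_nil, or_false] at hx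
    rcases hx with rfl|rfl|rfl|rfl|rfl|rfl|rfl|rfl|rfl|rfl|rfl|rfl|rfl|rfl|rfl|rfl|rfl <;>
      first
        | exact beqS_slash t (by decide)
        | (rw [pvE1]; exact beqM_ne (by decide) ha (fun h => hm h.symm))
        | (rw [pvE2]; exact beqM_ne (by decide) ha (fun h => hm h.symm))
        | (rw [pvE3]; exact beqM_ne (by decide) ha (fun h => hm h.symm))
        | (rw [pvE4]; exact beqM_ne (by decide) ha (fun h => hm h.symm))
        | (rw [pvE5]; exact beqM_ne (by decide) ha (fun h => hm h.symm))
        | (rw [pvE6]; exact beqM_ne (by decide) ha (fun h => hm h.symm))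
        | (rw [pvE7]; exact beqM_ne (by decide) ha (fun h => hm h.symm))
  show (Option.map _ (List.find? _ pvCategoryItems)) = none
  rw [List.find?_eq_none.mpr (fun x hx => by simp [hmem x hx])]
  rfl

-- B's core computation on the inner segment list (proof-side restatement of B's body)
def pvCore (inner : List (List Char)) : String :=
  let s0 := (PySem.List.pyGet? inner 0).getD []
  let s1 := (PySem.List.pyGet? inner 1).getD []
  if inner.length == 2 && (s0 == "mirror".toList)
      && pvExtsB.any (fun e => PySem.Chars.endswith (PySem.Chars.lower s1) e.toList)
  then "mirror_ui"
  else if 2 ≤ inner.length then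
    match pvCatMapB.get? (s0 ++ "/".toList ++ s1) with
    | some c => c
    | none => pvCatMapB.getD s0 "uncategorized"
  else pvCatMapB.getD s0 "uncategorized"

lemma alt_eq_core (rel_path : String) :
    category_for_path_py_alt rel_path =
      pvCore (let segs := pvSplitSlash (rel_path.toList.map pvRepl);
              if 3 ≤ segs.length then segs.drop 2 else segs) := by
  unfold category_for_path_py_alt pvCore
  have h := segs_eq rel_path.toList
  simp only []
  rw [show (rel_path.toList.foldl pvSplitStep ([], [])).1 ++
        [(rel_path.toList.foldl pvSplitStep ([], [])).2] =
        pvSplitSlash (rel_path.toList.map pvRepl) from h]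

-- guard and scan for a single slash-free segment
lemma core_single (s : List Char) (hs : '/' ∉ s) :
    (if pvGuard s then "mirror_ui" else pvScan pvCategoryItems s) = pvCore [s] := by
  have hg : PySem.Chars.startswith s ("mirror/".toList) = false := by
    cases hsw : PySem.Chars.startswith s ("mirror/".toList) with
    | false => rfl
    | true =>
      exfalso
      exact hs ((PySem.Chars.startswith_iff _ _).mp hsw |>.subset (by decide))
  have hscan : pvScan pvCategoryItems s =
      ((PySem.Dict.mk pvCategoryItems).get? s).getD "uncategorized" := by
    refine scan_eq_get pvCategoryItems s s ?_
    intro p c hmem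
    simp only [pvCategoryItems, List.mem_cons, Prod.mk.injEq, List.not_mem_nil, or_false] at hmem
    rcases hmem with ⟨rfl,-⟩|⟨rfl,-⟩|⟨rfl,-⟩|⟨rfl,-⟩|⟨rfl,-⟩|⟨rfl,-⟩|⟨rfl,-⟩|⟨rfl,-⟩|⟨rfl,-⟩|⟨rfl,-⟩|⟨rfl,-⟩|⟨rfl,-⟩|⟨rfl,-⟩|⟨rfl,-⟩|⟨rfl,-⟩|⟨rfl,-⟩|⟨rfl,-⟩ <;>
      first
        | exact condS_noslash (by decide) hs
        | (rw [pvE1]; rw [condM_noslash hs, beqM_noslash hs])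
        | (rw [pvE2]; rw [condM_noslash hs, beqM_noslash hs])
        | (rw [pvE3]; rw [condM_noslash hs, beqM_noslash hs])
        | (rw [pvE4]; rw [condM_noslash hs, beqM_noslash hs])
        | (rw [pvE5]; rw [condM_noslash hs, beqM_noslash hs])
        | (rw [pvE6]; rw [condM_noslash hs, beqM_noslash hs])
        | (rw [pvE7]; rw [condM_noslash hs, beqM_noslash hs])
  simp only [pvGuard, hg, Bool.false_and, Bool.false_eq_true, if_false, hscan, pvCore,
    PySem.List.pyGet?_zero_cons, Option.getD_some, List.length_singleton, catMapB_eq,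
    PySem.Dict.getD]
  norm_num

-- guard and scan for exactly two slash-free segments
lemma core_pair (a t : List Char) (ha : '/' ∉ a) (ht : '/' ∉ t) :
    (if pvGuard (a ++ '/' :: t) then "mirror_ui"
      else pvScan pvCategoryItems (a ++ '/' :: t)) = pvCore [a, t] := by
  have hsw : PySem.Chars.startswith (a ++ '/' :: t) ("mirror/".toList) = (a == "mirror".toList) := by
    rw [Bool.eq_iff_iff]
    rw [PySem.Chars.startswith_iff, show ("mirror/".toList : List Char) =
      "mirror".toList ++ '/' :: [] from by decide, pref_seg [] t (by decide) ha]
    constructor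
    · rintro ⟨h, -⟩; exact beq_iff_eq.mpr h.symm
    · intro h; exact ⟨(beq_iff_eq.mp h).symm, List.nil_prefix⟩
  have hc1 : (a ++ '/' :: t).count '/' = 1 := by
    rw [List.count_append, List.count_cons, count_sf ha, count_sf ht]
    decide
  have hcount : (PySem.Chars.count (a ++ '/' :: t) ['/'] == 1) = true := by
    rw [count_slash, hc1]
    rfl
  have hextfun : ∀ e, '/' ∉ e →
      PySem.Chars.endswith (PySem.Chars.lower (a ++ '/' :: t)) e =
        PySem.Chars.endswith (PySem.Chars.lower t) e := by
    intro e he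
    rw [lower_split]
    exact endswith_cross _ _ he
  have hany2 : pvImageExts.any (fun e => PySem.Chars.endswith (PySem.Chars.lower (a ++ '/' :: t)) e) =
      pvImageExts.any (fun e => PySem.Chars.endswith (PySem.Chars.lower t) e) := by
    simp only [pvImageExts, List.any_cons, List.any_nil]
    rw [hextfun _ (by decide), hextfun _ (by decide), hextfun _ (by decide),
      hextfun _ (by decide), hextfun _ (by decide)]
  have hguard : pvGuard (a ++ '/' :: t) =
      ((a == "mirror".toList) &&
        pvImageExts.any (fun e => PySem.Chars.endswith (PySem.Chars.lower t) e)) := by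
    unfold pvGuard
    rw [hsw, hcount, hany2]
    simp
  have hd : (PySem.Dict.mk pvCategoryItems).get? (a ++ '/' :: t) = none ∨
      (PySem.Dict.mk pvCategoryItems).get? a = none := by
    by_cases hm : a = "mirror".toList
    · exact Or.inr (hm ▸ get?_mirror_none)
    · exact Or.inl (get?_slashkey_none t ha hm)
  have hscan : pvScan pvCategoryItems (a ++ '/' :: t) =
      (match (PySem.Dict.mk pvCategoryItems).get? (a ++ '/' :: t) with
        | some c => c
        | none => ((PySem.Dict.mk pvCategoryItems).get? a).getD "uncategorized") := by
    refine scan_eq_get2 pvCategoryItems (a ++ '/' :: t) (a ++ '/' :: t) a ?_ hd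
    intro p c hmem
    simp only [pvCategoryItems, List.mem_cons, Prod.mk.injEq, List.not_mem_nil, or_false] at hmem
    rcases hmem with ⟨rfl,-⟩|⟨rfl,-⟩|⟨rfl,-⟩|⟨rfl,-⟩|⟨rfl,-⟩|⟨rfl,-⟩|⟨rfl,-⟩|⟨rfl,-⟩|⟨rfl,-⟩|⟨rfl,-⟩|⟨rfl,-⟩|⟨rfl,-⟩|⟨rfl,-⟩|⟨rfl,-⟩|⟨rfl,-⟩|⟨rfl,-⟩|⟨rfl,-⟩ <;>
      first
        | exact condS_slash1' t (by decide) ha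
        | (rw [pvE1]; exact condM_slash1' (by decide) (by decide) ha ht)
        | (rw [pvE2]; exact condM_slash1' (by decide) (by decide) ha ht)
        | (rw [pvE3]; exact condM_slash1' (by decide) (by decide) ha ht)
        | (rw [pvE4]; exact condM_slash1' (by decide) (by decide) ha ht)
        | (rw [pvE5]; exact condM_slash1' (by decide) (by decide) ha ht)
        | (rw [pvE6]; exact condM_slash1' (by decide) (by decide) ha ht)
        | (rw [pvE7]; exact condM_slash1' (by decide) (by decide) ha ht)
  have hexts : (pvExtsB.map String.toList) = pvImageExts := by decide
  simp only [pvCore, PySem.List.pyGet?_zero_cons, Option.getD_some, catMapB_eq,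
    PySem.Dict.getD, hguard, hscan]
  have h1 : PySem.List.pyGet? [a, t] 1 = some t := by
    rw [show (1 : Int) = ((1 : Nat) : Int) from rfl, PySem.List.pyGet?_natCast]
    rfl
  rw [h1]
  have hany : pvExtsB.any (fun e => PySem.Chars.endswith (PySem.Chars.lower t) e.toList) =
      pvImageExts.any (fun e => PySem.Chars.endswith (PySem.Chars.lower t) e) := by
    rw [← hexts, List.any_map]
    rfl
  simp only [Option.getD_some, List.length_cons, hany]
  norm_num
  rfl

-- guard and scan for three or more slash-free segments
lemma core_many (a b : List Char) (w : List Char) (ws : List (List Char))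
    (ha : '/' ∉ a) (hb : '/' ∉ b) :
    (if pvGuard (PySem.Chars.join ['/'] (a :: b :: w :: ws)) then "mirror_ui"
      else pvScan pvCategoryItems (PySem.Chars.join ['/'] (a :: b :: w :: ws))) =
      pvCore (a :: b :: w :: ws) := by
  have hjoin : PySem.Chars.join ['/'] (a :: b :: w :: ws) =
      a ++ '/' :: (b ++ '/' :: PySem.Chars.join ['/'] (w :: ws)) := by
    rw [PySem.Chars.join_cons_cons, PySem.Chars.join_cons_cons]
    simp
  have hcount : (PySem.Chars.count (PySem.Chars.join ['/'] (a :: b :: w :: ws)) ['/'] == 1) = false := by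
    rw [hjoin, count_slash]
    simp [List.count_append, count_sf ha, count_sf hb]
  have hguard : pvGuard (PySem.Chars.join ['/'] (a :: b :: w :: ws)) = false := by
    unfold pvGuard
    rw [hcount]
    simp
  have hd : (PySem.Dict.mk pvCategoryItems).get? (a ++ '/' :: b) = none ∨
      (PySem.Dict.mk pvCategoryItems).get? a = none := by
    by_cases hm : a = "mirror".toList
    · exact Or.inr (hm ▸ get?_mirror_none)
    · exact Or.inl (get?_slashkey_none b ha hm)
  have hscan : pvScan pvCategoryItems (a ++ '/' :: (b ++ '/' :: PySem.Chars.join ['/'] (w :: ws))) =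
      (match (PySem.Dict.mk pvCategoryItems).get? (a ++ '/' :: b) with
        | some c => c
        | none => ((PySem.Dict.mk pvCategoryItems).get? a).getD "uncategorized") := by
    refine scan_eq_get2 pvCategoryItems _ (a ++ '/' :: b) a ?_ hd
    intro p c hmem
    simp only [pvCategoryItems, List.mem_cons, Prod.mk.injEq, List.not_mem_nil, or_false] at hmem
    rcases hmem with ⟨rfl,-⟩|⟨rfl,-⟩|⟨rfl,-⟩|⟨rfl,-⟩|⟨rfl,-⟩|⟨rfl,-⟩|⟨rfl,-⟩|⟨rfl,-⟩|⟨rfl,-⟩|⟨rfl,-⟩|⟨rfl,-⟩|⟨rfl,-⟩|⟨rfl,-⟩|⟨rfl,-⟩|⟨rfl,-⟩|⟨rfl,-⟩|⟨rfl,-⟩ <;>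
      first
        | exact condS_slash2' _ (by decide) ha
        | (rw [pvE1]; exact condM_slash2' _ (by decide) (by decide) ha hb)
        | (rw [pvE2]; exact condM_slash2' _ (by decide) (by decide) ha hb)
        | (rw [pvE3]; exact condM_slash2' _ (by decide) (by decide) ha hb)
        | (rw [pvE4]; exact condM_slash2' _ (by decide) (by decide) ha hb)
        | (rw [pvE5]; exact condM_slash2' _ (by decide) (by decide) ha hb)
        | (rw [pvE6]; exact condM_slash2' _ (by decide) (by decide) ha hb)
        | (rw [pvE7]; exact condM_slash2' _ (by decide) (by decide) ha hb)
  have h1 : PySem.List.pyGet? (a :: b :: w :: ws) 1 = some b := by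
    rw [show (1 : Int) = ((1 : Nat) : Int) from rfl, PySem.List.pyGet?_natCast]
    rfl
  simp only [pvCore, PySem.List.pyGet?_zero_cons, h1, Option.getD_some, catMapB_eq,
    PySem.Dict.getD, hguard, Bool.false_eq_true, if_false, List.length_cons]
  have hlen2 : (ws.length + 1 + 1 + 1 == 2) = false := by simp
  rw [hlen2]
  simp only [Bool.false_and, Bool.false_eq_true, if_false]
  rw [hjoin, hscan, if_pos (show 2 ≤ ws.length + 1 + 1 + 1 by omega),
    show a ++ "/".toList ++ b = a ++ '/' :: b from by simp]

-- all shapes of a nonempty slash-free segment list at once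
lemma core_all (I : List (List Char)) (hne : I ≠ []) (hsf : ∀ x ∈ I, '/' ∉ x) :
    (if pvGuard (PySem.Chars.join ['/'] I) then "mirror_ui"
      else pvScan pvCategoryItems (PySem.Chars.join ['/'] I)) = pvCore I := by
  match I with
  | [] => exact absurd rfl hne
  | [s] =>
    rw [PySem.Chars.join_singleton]
    exact core_single s (hsf s (by simp))
  | [a, t] =>
    rw [PySem.Chars.join_cons_cons, PySem.Chars.join_singleton,
      show a ++ ['/'] ++ t = a ++ '/' :: t from by simp]
    exact core_pair a t (hsf a (by simp)) (hsf t (by simp))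
  | a :: b :: w :: ws =>
    exact core_many a b w ws (hsf a (by simp)) (hsf b (by simp))

-- ===== VERDICT =====
theorem category_for_path_py_spec : Claim_equal_category_for_path_py := by
  intro rel_path _
  unfold Spec_category_for_path_py
  rw [alt_eq_core]
  unfold category_for_path_py pvInner
  simp only []
  rw [replace_eq, splitOn_eq]
  set P := pvSplitSlash (rel_path.toList.map pvRepl) with hP
  have hsf : ∀ x ∈ P, '/' ∉ x := pvSplitSlash_sf _
  have hjoinP : PySem.Chars.join ['/'] P = rel_path.toList.map pvRepl := join_pvSplitSlash _
  by_cases h3 : 3 ≤ P.length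
  · rw [if_pos h3, if_pos h3]
    refine core_all (P.drop 2) ?_ (fun x hx => hsf x (List.mem_of_mem_drop hx))
    intro hnil
    have := List.length_drop (l := P) (i := 2)
    rw [hnil] at this
    simp at this
    omega
  · rw [if_neg h3, if_neg h3, ← hjoinP]
    exact core_all P (hP ▸ pvSplitSlash_ne_nil _) hsf
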